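-- pv_equiv track=rewrite | github.com/sschott20/Competitive-Programming | Codeforces Round 915 (Div. 2)/C.py | solve
-- ===== SOURCE A (Python) =====
-- def solve(test):
--     a = [ord(i) for i in test]
--     # s_a = sorted(a)
--     # if a == s_a:
--     #     return 0
--     ind = [len(a) - 1]
--     subseq = [a[-1]]
--     for i in range(len(a) - 2, -1, -1):
--         if a[i] >= subseq[-1]:
--             subseq.append(a[i])
--             ind.append(i)
--
--     acc = -1
--     M = max(subseq)
--     for i in range(len(subseq)):
--         if subseq[i] == M:
--             acc += 1
--
--     for index in ind:
--         nxt = subseq.pop()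
--         a[index] = nxt
--     s_a = sorted(a)
--
--     if a == s_a:
--         return len(ind) - 1 - acc
--     else:
--         return -1
-- ===== SOURCE B (Python) =====
-- def solve(test):
--     a = [ord(c) for c in test]
--     # forward monotonic stack: after the scan it holds exactly the positions whose
--     # value is >= every later value (bottom-to-top values non-increasing)
--     stack = []
--     for i, x in enumerate(a):
--         while stack and stack[-1][1] < x:
--             stack.pop()
--         stack.append((i, x))
--     b = a[:]
--     for (i, _), (_, v) in zip(stack, reversed(stack)):
--         b[i] = v
--     if all(b[j] <= b[j + 1] for j in range(len(b) - 1)):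
--         top = stack[0][1]
--         ties = sum(1 for _, v in stack if v == top)
--         return len(stack) - ties
--     return -1
-- ===== Notes on version B (the rewrite author's own statement) =====
-- stated objective: alternative
-- what changed: A scans backward collecting the suffix-maxima subsequence with a stack, rewrites the array by popping that stack over the collected indices, counts ties with an extra indexed loop, and tests sortedness by sorting a copy and comparing; B scans forward with a monotonic pop-stack of (index,value) pairs (no backward pass and no sorting anywhere), writes the stack's values back reversed via one zip, counts ties against the bottom-of-stack value, and checks sortedness with a linear adjacent-pair scan.
import Mathlib
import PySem

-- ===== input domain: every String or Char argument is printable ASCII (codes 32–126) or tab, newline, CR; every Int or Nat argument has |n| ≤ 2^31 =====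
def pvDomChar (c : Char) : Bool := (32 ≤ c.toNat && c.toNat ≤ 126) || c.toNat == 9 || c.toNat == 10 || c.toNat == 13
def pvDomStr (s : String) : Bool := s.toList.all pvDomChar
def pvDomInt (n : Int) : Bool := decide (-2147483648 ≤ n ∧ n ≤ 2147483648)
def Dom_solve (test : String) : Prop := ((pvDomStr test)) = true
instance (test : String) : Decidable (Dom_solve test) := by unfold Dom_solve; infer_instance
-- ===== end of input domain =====

-- B replaces A's backward suffix-maxima scan + sort-and-writeback + sort-and-compare check
-- by a single forward monotonic pop-stack, a reversed-zip write-back (no sorting anywhere)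
-- and a linear adjacent-pair sortedness scan (objective: alternative).

-- ===== PORT A =====
def solve (test : String) : Int :=
  let a : List Int := test.toList.map (fun c => (c.toNat : Int))
  let st :=
    (PySem.List.pyRange ((a.length : Int) - 2) (-1) (-1)).foldl
      (fun (st : List Int × List Int) i =>
        if PySem.List.pyGetD a i 0 ≥ PySem.List.pyGetD st.1 (-1) 0 then
          (st.1 ++ [PySem.List.pyGetD a i 0], st.2 ++ [i])
        else st)
      ([PySem.List.pyGetD a (-1) 0], [(a.length : Int) - 1])
  let subseq := st.1
  let ind := st.2
  let M := (PySem.List.max? subseq (fun x => x)).getD 0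
  let acc := (PySem.List.pyRange 0 (subseq.length : Int) 1).foldl
      (fun acc i => if PySem.List.pyGetD subseq i 0 = M then acc + 1 else acc) (-1 : Int)
  let st2 := ind.foldl
      (fun (st2 : List Int × List Int) index =>
        (PySem.List.pop? st2.2).elim st2
          (fun pr => (PySem.List.pySetD st2.1 index pr.1, pr.2)))
      (a, subseq)
  let a2 := st2.1
  let s_a := PySem.List.sorted a2 (fun x => x)
  if a2 = s_a then (ind.length : Int) - 1 - acc else -1

-- ===== PORT B =====
-- Python's `while stack and stack[-1][1] < x: stack.pop()`; the stack is held top-first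
-- here, so Python's append/pop at the END are cons/drop at the HEAD.
def pvPopLt (x : Int) : List (Int × Int) → List (Int × Int)
  | [] => []
  | p :: rest => if p.2 < x then pvPopLt x rest else p :: rest

def solve_alt (test : String) : Int :=
  let a : List Int := test.toList.map (fun c => (c.toNat : Int))
  let stackRev := (PySem.List.enumerate a).foldl
      (fun (st : List (Int × Int)) ix => ix :: pvPopLt ix.2 st) []
  let stack := stackRev.reverse        -- Python's stack, bottom-first
  let b := (stack.zip stackRev).foldl
      (fun acc piv => PySem.List.pySetD acc piv.1.1 piv.2.2) a
  if (PySem.List.pyRange 0 ((b.length : Int) - 1) 1).all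
      (fun j => decide (PySem.List.pyGetD b j 0 ≤ PySem.List.pyGetD b (j + 1) 0)) then
    let top := (PySem.List.pyGetD stack 0 ((0 : Int), (0 : Int))).2
    let ties := stack.foldl (fun (acc : Int) p => if p.2 = top then acc + 1 else acc) 0
    (stack.length : Int) - ties
  else -1

-- ===== PRECONDITION & SPEC =====
-- Pre_ excludes only the empty string, on which Python A raises IndexError at a[-1] (B's
-- stack[0] raises there as well).
def Pre_solve (test : String) : Prop := test ≠ ""
instance (test : String) : Decidable (Pre_solve test) := by unfold Pre_solve; infer_instance
def pvWitness_solve : String := "ba"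

def Spec_solve (test : String) (out : Int) : Prop := out = solve_alt test
instance (test : String) (out : Int) : Decidable (Spec_solve test out) := by unfold Spec_solve; infer_instance

-- ===== CLAIM (what is proved, stated in full; the proofs are below) =====
def Claim_equal_solve : Prop := ∀ (test : String), Dom_solve test → Pre_solve test → Spec_solve test (solve test)

-- ===== LEMMAS AND PROOFS =====

-- position k of the reversed array is kept iff its value dominates all values to its left
-- in the reversed array (= all values to its right in the original array)
def pvKeptP (r : List Int) (k : Nat) : Bool :=
  decide (List.foldl max (-1) (r.take k) ≤ r.getD k 0)

-- kept within the length-m prefix: a[i] dominates all of a[i+1:m]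
def pvKeptPre (a : List Int) (m i : Nat) : Bool :=
  ((a.take m).drop (i+1)).all (fun y => decide (y ≤ a.getD i 0))

theorem pvPairwise_le_getLast (l : List Int) (hp : l.Pairwise (· ≤ ·)) (x : Int)
    (hx : x ∈ l) (h : l ≠ []) : x ≤ l.getLast h := by
  induction l with
  | nil => simp at hx
  | cons y t ih =>
    rcases List.eq_nil_or_concat t with rfl | ⟨t', v, hs⟩
    · simp at hx; simp [hx]
    · subst hs
      have hp' := List.pairwise_cons.mp hp
      rw [List.getLast_cons (by simp)]
      rcases List.mem_cons.mp hx with rfl | hxt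
      · have : x ≤ v := hp'.1 v (by simp)
        simpa [List.getLast_append] using this
      · exact ih hp'.2 hxt (by simp)

theorem pvPopFold (idxs : List Int) (s : List Int) (arr : List Int) (h : idxs.length = s.length) :
    (idxs.foldl (fun st2 index => (PySem.List.pop? st2.2).elim st2
        (fun pr => (PySem.List.pySetD st2.1 index pr.1, pr.2))) (arr, s)).1
    = (idxs.zip s.reverse).foldl (fun acc iv => PySem.List.pySetD acc iv.1 iv.2) arr := by
  induction idxs generalizing s arr with
  | nil => simp
  | cons i it ih =>
    obtain ⟨s', v, rfl⟩ : ∃ s' v, s = s' ++ [v] := by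
      rcases List.eq_nil_or_concat s with rfl | ⟨s', v, hs⟩
      · simp at h
      · exact ⟨s', v, by simpa using hs⟩
    rw [List.foldl_cons]
    dsimp only
    simp only [PySem.List.pop?_last, Option.elim_some]
    rw [ih s' _ (by simpa using h)]
    simp

theorem pvSetFold_of_not_mem (ps : List (Nat × Int)) (i : Nat) (v : Int)
    (hi : i ∉ ps.map Prod.fst) (arr : List Int) :
    ps.foldl (fun acc iv => acc.set iv.1 iv.2) (arr.set i v)
      = (ps.foldl (fun acc iv => acc.set iv.1 iv.2) arr).set i v := by
  induction ps generalizing arr with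
  | nil => simp
  | cons p pt ih =>
    simp only [List.map_cons, List.mem_cons, not_or] at hi
    rw [List.foldl_cons, List.foldl_cons, List.set_comm v p.2 hi.1, ih hi.2]

theorem pvSetFold_reverse (ps : List (Nat × Int)) (h : (ps.map Prod.fst).Nodup) (arr : List Int) :
    ps.reverse.foldl (fun acc iv => acc.set iv.1 iv.2) arr
      = ps.foldl (fun acc iv => acc.set iv.1 iv.2) arr := by
  induction ps generalizing arr with
  | nil => rfl
  | cons p pt ih =>
    simp only [List.map_cons, List.nodup_cons] at h
    rw [List.reverse_cons, List.foldl_append, ih h.2, List.foldl_cons]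
    exact (pvSetFold_of_not_mem pt p.1 p.2 h.1 arr).symm

theorem pvPySetFold_length (ps : List (Int × Int)) (arr : List Int) :
    (ps.foldl (fun acc iv => PySem.List.pySetD acc iv.1 iv.2) arr).length = arr.length := by
  induction ps generalizing arr with
  | nil => rfl
  | cons p pt ih => rw [List.foldl_cons, ih, PySem.List.length_pySetD]

theorem pvZipReverse {α β : Type} (l1 : List α) (l2 : List β) (h : l1.length = l2.length) :
    l1.reverse.zip l2.reverse = (l1.zip l2).reverse := by
  induction l1 generalizing l2 with
  | nil => simp
  | cons x t1 ih =>
    cases l2 with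
    | nil => simp at h
    | cons y t2 =>
      simp only [List.reverse_cons, List.zip_cons_cons]
      rw [List.zip_append (by simpa using (by simpa using h : t1.length = t2.length)),
        ih t2 (by simpa using h)]
      simp

theorem pvRange_reverse (n : Nat) :
    (List.range n).reverse = (List.range n).map (fun k => n - 1 - k) := by
  apply List.ext_getElem (by simp)
  intro j h1 h2
  simp only [List.getElem_reverse, List.length_range, List.getElem_range, List.getElem_map]

theorem pvPairwise_iff_adj (w : List Int) :
    w.Pairwise (· ≤ ·) ↔ ∀ j, j + 1 < w.length → w.getD j 0 ≤ w.getD (j+1) 0 := by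
  constructor
  · intro hp j hj
    rw [List.getD_eq_getElem _ _ (by omega), List.getD_eq_getElem _ _ hj]
    exact List.pairwise_iff_getElem.mp hp j (j+1) (by omega) hj (by omega)
  · intro hadj
    rw [List.pairwise_iff_getElem]
    intro i j hi hj hij
    have key : ∀ jj, i ≤ jj → ∀ (h : jj < w.length), w[i]'(by omega) ≤ w[jj] := by
      intro jj
      induction jj with
      | zero =>
        intro hle h
        have hi0 : i = 0 := by omega
        subst hi0
        exact le_rfl
      | succ jj ihj =>
        intro hle h
        by_cases hij2 : i = jj + 1
        · subst hij2; exact le_rfl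
        · have h2 := hadj jj (by omega)
          rw [List.getD_eq_getElem _ _ (by omega), List.getD_eq_getElem _ _ h] at h2
          exact le_trans (ihj (by omega) (by omega)) h2
    exact key j (by omega) hj

theorem pvLoopA_aux (a : List Int) (hne : a ≠ []) (ha : ∀ x ∈ a, 0 ≤ x)
    (m : Nat) (hm : m ≤ a.length - 1) :
    ((List.range m).foldl
      (fun (st : List Int × List Int) (k : Nat) =>
        if PySem.List.pyGetD a ((a.length : Int) - 2 - (k : Int)) 0 ≥ PySem.List.pyGetD st.1 (-1) 0 then
          (st.1 ++ [PySem.List.pyGetD a ((a.length : Int) - 2 - (k : Int)) 0],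
           st.2 ++ [(a.length : Int) - 2 - (k : Int)])
        else st)
      ([PySem.List.pyGetD a (-1) 0], [(a.length : Int) - 1]))
    = (((List.range (m+1)).filter (pvKeptP a.reverse)).map (fun k => a.reverse.getD k 0),
       ((List.range (m+1)).filter (pvKeptP a.reverse)).map (fun (k : Nat) => (a.length : Int) - 1 - (k : Int)))
    ∧ PySem.List.pyGetD (((List.range (m+1)).filter (pvKeptP a.reverse)).map (fun k => a.reverse.getD k 0)) (-1) 0
      = List.foldl max (-1) (a.reverse.take (m+1)) := by
  have npos : 0 < a.length := List.length_pos_iff.mpr hne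
  have hrlen : a.reverse.length = a.length := List.length_reverse
  induction m with
  | zero =>
    have h0 : a.reverse.getD 0 0 = a.getLast hne := by
      rw [List.getD_eq_getElem _ _ (by omega), List.getElem_reverse, List.getLast_eq_getElem]
      simp
    have hP0 : pvKeptP a.reverse 0 = true := by
      unfold pvKeptP
      simp only [List.take_zero, List.foldl_nil, decide_eq_true_eq, h0]
      have := ha _ (List.getLast_mem hne)
      omega
    have htake1 : a.reverse.take 1 = [a.reverse.getD 0 0] := by
      rcases hr : a.reverse with _ | ⟨x, xs⟩
      · exfalso; rw [hr] at hrlen; simp at hrlen; omega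
      · simp [List.getD]
    have hget : PySem.List.pyGetD [a.reverse.getD 0 0] (-1) 0 = a.reverse.getD 0 0 := by
      rw [show [a.reverse.getD 0 0] = ([] : List Int) ++ [a.reverse.getD 0 0] from by simp,
        PySem.List.pyGetD_neg_one_append_singleton]
    have h0' : a.reverse[0]?.getD 0 = a.getLast hne := by
      rw [List.getElem?_eq_getElem (by omega), Option.getD_some, List.getElem_reverse,
        List.getLast_eq_getElem]
      simp
    constructor
    · simp [List.range_one, hP0, h0', PySem.List.pyGetD_neg_one a 0 hne]
    · simp only [Nat.zero_add, List.range_one, List.filter_cons, hP0, if_true,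
        List.filter_nil, List.map_cons, List.map_nil, htake1, List.foldl_cons, List.foldl_nil, hget]
      have := ha _ (List.getLast_mem hne)
      rw [h0]
      exact (max_eq_right (by omega)).symm
  | succ m ih =>
    have hm' : m ≤ a.length - 1 := by omega
    obtain ⟨ih1, ih2⟩ := ih hm'
    have hmn : m + 1 < a.length := by omega
    have f1 : PySem.List.pyGetD a ((a.length : Int) - 2 - (m : Int)) 0 = a.reverse.getD (m+1) 0 := by
      have hcast : (a.length : Int) - 2 - (m : Int) = ((a.length - 2 - m : Nat) : Int) := by
        omega
      rw [hcast, PySem.List.pyGetD_natCast]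
      rw [List.getD_eq_getElem _ _ (by omega), List.getD_eq_getElem _ _ (by omega),
        List.getElem_reverse]
      congr 1
      omega
    have ftake : a.reverse.take (m+2) = a.reverse.take (m+1) ++ [a.reverse.getD (m+1) 0] := by
      rw [List.take_add_one]
      congr 1
      rw [List.getElem?_eq_getElem (by omega), List.getD_eq_getElem _ _ (by omega)]
      rfl
    have frun : List.foldl max (-1) (a.reverse.take (m+2))
        = max (List.foldl max (-1) (a.reverse.take (m+1))) (a.reverse.getD (m+1) 0) := by
      rw [ftake, List.foldl_append]
      simp
    have fK : (List.range (m+2)).filter (pvKeptP a.reverse)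
        = (List.range (m+1)).filter (pvKeptP a.reverse)
          ++ if pvKeptP a.reverse (m+1) then [m+1] else [] := by
      rw [List.range_succ, List.filter_append]
      simp [List.filter_cons]
    rw [List.range_succ, List.foldl_append, List.foldl_cons, List.foldl_nil, ih1]
    simp only [f1, ih2]
    by_cases hcond : pvKeptP a.reverse (m+1) = true
    · have hle : List.foldl max (-1) (a.reverse.take (m+1)) ≤ a.reverse.getD (m+1) 0 := by
        have := hcond
        unfold pvKeptP at this
        simpa using this
      rw [if_pos (by exact hle)]
      refine ⟨?_, ?_⟩
      · rw [fK, if_pos hcond]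
        simp only [List.map_append, List.map_cons, List.map_nil, Prod.mk.injEq, true_and]
        congr 1
        simp only [List.cons.injEq, and_true]
        push_cast
        ring
      · rw [fK, if_pos hcond, frun]
        simp only [List.map_append, List.map_cons, List.map_nil]
        rw [PySem.List.pyGetD_neg_one_append_singleton]
        exact (max_eq_right hle).symm
    · have hgt : ¬ (List.foldl max (-1) (a.reverse.take (m+1)) ≤ a.reverse.getD (m+1) 0) := by
        intro hc
        exact hcond (by unfold pvKeptP; simpa using hc)
      rw [if_neg (by exact hgt)]
      refine ⟨?_, ?_⟩
      · rw [fK, if_neg hcond, List.append_nil]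
      · rw [fK, if_neg hcond, List.append_nil, ih2, frun]
        exact (max_eq_left (by omega)).symm

theorem pvK_zero_mem (a : List Int) (hne : a ≠ []) (ha : ∀ x ∈ a, 0 ≤ x) :
    0 ∈ (List.range a.length).filter (pvKeptP a.reverse) := by
  rw [List.mem_filter]
  have npos : 0 < a.length := List.length_pos_iff.mpr hne
  refine ⟨by simpa using npos, ?_⟩
  unfold pvKeptP
  simp only [List.take_zero, List.foldl_nil, decide_eq_true_eq]
  rw [List.getD_eq_getElem _ _ (by simpa using npos), List.getElem_reverse]
  have : (0:Int) ≤ a[a.length - 1 - 0]'(by omega) := ha _ (List.getElem_mem _)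
  omega

theorem pvSubseq_pairwise (a : List Int) :
    (((List.range a.length).filter (pvKeptP a.reverse)).map (fun k => a.reverse.getD k 0)).Pairwise (· ≤ ·) := by
  rw [List.pairwise_map]
  have hp0 : ((List.range a.length).filter (pvKeptP a.reverse)).Pairwise (· < ·) :=
    List.Pairwise.filter _ List.pairwise_lt_range
  have hp : ((List.range a.length).filter (pvKeptP a.reverse)).Pairwise
      (fun k1 k2 => k1 < k2 ∧ k2 < a.length ∧ pvKeptP a.reverse k2 = true) := by
    refine hp0.imp_of_mem ?_
    intro k1 k2 h1 h2 hlt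
    have h2' := List.mem_filter.mp h2
    exact ⟨hlt, by simpa using h2'.1, h2'.2⟩
  refine hp.imp ?_
  rintro k1 k2 ⟨h12, h2n, hP⟩
  unfold pvKeptP at hP
  simp only [decide_eq_true_eq] at hP
  refine le_trans ?_ hP
  have hk1 : k1 < a.reverse.length := by simp; omega
  have hmem : a.reverse.getD k1 0 ∈ a.reverse.take k2 := by
    rw [List.getD_eq_getElem _ _ hk1]
    rw [show a.reverse[k1] = (a.reverse.take k2)[k1]'(by simp; omega) from by rw [List.getElem_take]]
    exact List.getElem_mem _
  exact (PySem.List.le_foldl_max _ _).2 _ hmem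

-- ---- B-side: the forward monotonic stack ----

-- values along the kept positions of a prefix, in increasing index order, are non-increasing
theorem pvKeptPre_pairwise (a : List Int) (m : Nat) (hm : m ≤ a.length) :
    (((List.range m).filter (pvKeptPre a m)).map (fun (i : Nat) => ((i : Int), a.getD i 0))).Pairwise
      (fun p q => q.2 ≤ p.2) := by
  rw [List.pairwise_map]
  have hp0 : ((List.range m).filter (pvKeptPre a m)).Pairwise (· < ·) :=
    List.Pairwise.filter _ List.pairwise_lt_range
  have hp : ((List.range m).filter (pvKeptPre a m)).Pairwise
      (fun k1 k2 => k1 < k2 ∧ k2 < m ∧ pvKeptPre a m k1 = true) := by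
    refine hp0.imp_of_mem ?_
    intro k1 k2 h1 h2 hlt
    have h1' := List.mem_filter.mp h1
    have h2' := List.mem_filter.mp h2
    exact ⟨hlt, by simpa using h2'.1, h1'.2⟩
  refine hp.imp ?_
  rintro k1 k2 ⟨h12, h2m, hK⟩
  unfold pvKeptPre at hK
  rw [List.all_eq_true] at hK
  have hlen : k2 - (k1+1) < ((a.take m).drop (k1+1)).length := by
    simp only [List.length_drop, List.length_take]
    omega
  have hmem : a.getD k2 0 ∈ (a.take m).drop (k1+1) := by
    have hval : ((a.take m).drop (k1+1))[k2 - (k1+1)]'hlen = a.getD k2 0 := by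
      rw [List.getElem_drop, List.getElem_take, List.getD_eq_getElem _ _ (by omega)]
      congr 1
      omega
    rw [← hval]
    exact List.getElem_mem _
  simpa using hK _ hmem

-- popping while the top value is < x from a top-first non-decreasing stack is a filter
theorem pvPopLt_eq_filter (x : Int) (l : List (Int × Int))
    (h : l.Pairwise (fun p q => p.2 ≤ q.2)) :
    pvPopLt x l = l.filter (fun p => decide (x ≤ p.2)) := by
  induction l with
  | nil => rfl
  | cons p rest ih =>
    have h' := List.pairwise_cons.mp h
    by_cases hp : p.2 < x
    · rw [pvPopLt, if_pos hp, ih h'.2, List.filter_cons]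
      simp [not_le.mpr hp]
    · rw [pvPopLt, if_neg hp, List.filter_cons]
      have : decide (x ≤ p.2) = true := by simp [not_lt.mp hp]
      rw [this]
      simp only [if_true]
      congr 1
      symm
      apply List.filter_eq_self.mpr
      intro q hq
      simp only [decide_eq_true_eq]
      exact le_trans (not_lt.mp hp) (h'.1 q hq)

-- the fold over the enumerated prefix holds (top-first) exactly the kept positions
theorem pvStackFold (a : List Int) (m : Nat) (hm : m ≤ a.length) :
    ((PySem.List.enumerate (a.take m)).foldl
        (fun (st : List (Int × Int)) ix => ix :: pvPopLt ix.2 st) [])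
    = (((List.range m).filter (pvKeptPre a m)).map (fun (i : Nat) => ((i : Int), a.getD i 0))).reverse := by
  induction m with
  | zero => simp [PySem.List.enumerate_nil]
  | succ m ih =>
    have hm' : m ≤ a.length := by omega
    have hmlt : m < a.length := by omega
    have hgd : a[m] = a.getD m 0 := (List.getD_eq_getElem a 0 hmlt).symm
    have htake : a.take (m+1) = a.take m ++ [a.getD m 0] := by
      rw [List.take_add_one, List.getElem?_eq_getElem hmlt, hgd]
      rfl
    rw [htake, PySem.List.enumerate_append, List.foldl_append, ih hm',
      PySem.List.enumerate_cons, PySem.List.enumerate_nil, List.foldl_cons, List.foldl_nil]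
    have hpw : ((((List.range m).filter (pvKeptPre a m)).map
        (fun (i : Nat) => ((i : Int), a.getD i 0))).reverse).Pairwise
        (fun p q : Int × Int => p.2 ≤ q.2) := by
      rw [List.pairwise_reverse]
      exact pvKeptPre_pairwise a m hm'
    rw [pvPopLt_eq_filter _ _ hpw, List.filter_reverse, List.filter_map]
    have hKm1 : (List.range (m+1)).filter (pvKeptPre a (m+1))
        = ((List.range m).filter (pvKeptPre a m)).filter
            (fun i => decide (a.getD m 0 ≤ a.getD i 0)) ++ [m] := by
      rw [List.range_succ, List.filter_append, List.filter_filter]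
      congr 1
      · apply List.filter_congr
        intro i hi
        have him : i < m := List.mem_range.mp hi
        unfold pvKeptPre
        rw [htake, List.drop_append_of_le_length (by simp [List.length_take]; omega),
          List.all_append]
        simp [Bool.and_comm]
      · have hKm : pvKeptPre a (m+1) m = true := by
          unfold pvKeptPre
          rw [List.drop_eq_nil_of_le (by simp [List.length_take])]
          rfl
        simp [hKm]
    rw [hKm1, List.map_append, List.reverse_append]
    have hlen : (((List.take m a).length : Nat) : Int) = (m : Int) := by
      simp only [List.length_take]
      omega
    simp only [List.map_cons, List.map_nil, List.reverse_cons, List.reverse_nil,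
      List.nil_append, List.cons_append, List.filter_filter, hlen, zero_add,
      Function.comp]

-- kept in the whole array ↔ A's pvKeptP at the mirrored position of the reversed array
theorem pvKept_mirror (a : List Int) (ha : ∀ x ∈ a, 0 ≤ x) (i : Nat) (hi : i < a.length) :
    pvKeptPre a a.length i = pvKeptP a.reverse (a.length - 1 - i) := by
  unfold pvKeptPre pvKeptP
  rw [List.take_length]
  have hget : a.reverse.getD (a.length - 1 - i) 0 = a.getD i 0 := by
    rw [List.getD_eq_getElem _ _ (by simp; omega), List.getD_eq_getElem _ _ hi,
      List.getElem_reverse]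
    congr 1
    omega
  have htk : a.reverse.take (a.length - 1 - i) = (a.drop (i+1)).reverse := by
    rw [List.take_reverse]
    congr 2
    omega
  have hnn : (0 : Int) ≤ a.getD i 0 := by
    rw [List.getD_eq_getElem _ _ hi]
    exact ha _ (List.getElem_mem _)
  rw [hget, htk, Bool.eq_iff_iff, List.all_eq_true, decide_eq_true_eq]
  constructor
  · intro hall
    rcases PySem.List.foldl_max_mem ((a.drop (i+1)).reverse) (-1) with hmm | hmm
    · rw [hmm]
      omega
    · simpa using hall _ (List.mem_reverse.mp hmm)
  · intro hle y hy
    have hyl : y ≤ List.foldl max (-1) ((a.drop (i+1)).reverse) :=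
      (PySem.List.le_foldl_max _ _).2 _ (List.mem_reverse.mpr hy)
    simp only [decide_eq_true_eq]
    omega

-- the kept-position list of B is the reverse of A's mirrored index list
theorem pvKf_eq (a : List Int) (ha : ∀ x ∈ a, 0 ≤ x) :
    (List.range a.length).filter (pvKeptPre a a.length)
      = (((List.range a.length).filter (pvKeptP a.reverse)).map (fun k => a.length - 1 - k)).reverse := by
  have h1 : (List.range a.length).filter (pvKeptP a.reverse)
      = (List.range a.length).filter ((pvKeptPre a a.length) ∘ (fun k => a.length - 1 - k)) := by
    apply List.filter_congr
    intro k hk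
    have hklt : k < a.length := List.mem_range.mp hk
    simp only [Function.comp]
    rw [pvKept_mirror a ha (a.length - 1 - k) (by omega)]
    congr 1
    omega
  conv_rhs => rw [h1, ← List.filter_map, ← pvRange_reverse, List.filter_reverse,
    List.reverse_reverse]

-- the central equivalence, over the list of code points
theorem pvMain (a : List Int) (hne : a ≠ []) (ha : ∀ x ∈ a, 0 ≤ x) :
    (let st :=
      (PySem.List.pyRange ((a.length : Int) - 2) (-1) (-1)).foldl
        (fun (st : List Int × List Int) i =>
          if PySem.List.pyGetD a i 0 ≥ PySem.List.pyGetD st.1 (-1) 0 then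
            (st.1 ++ [PySem.List.pyGetD a i 0], st.2 ++ [i])
          else st)
        ([PySem.List.pyGetD a (-1) 0], [(a.length : Int) - 1])
    let subseq := st.1
    let ind := st.2
    let M := (PySem.List.max? subseq (fun x => x)).getD 0
    let acc := (PySem.List.pyRange 0 (subseq.length : Int) 1).foldl
        (fun acc i => if PySem.List.pyGetD subseq i 0 = M then acc + 1 else acc) (-1 : Int)
    let st2 := ind.foldl
        (fun (st2 : List Int × List Int) index =>
          (PySem.List.pop? st2.2).elim st2
            (fun pr => (PySem.List.pySetD st2.1 index pr.1, pr.2)))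
        (a, subseq)
    let a2 := st2.1
    let s_a := PySem.List.sorted a2 (fun x => x)
    if a2 = s_a then (ind.length : Int) - 1 - acc else -1)
    =
    (let stackRev := (PySem.List.enumerate a).foldl
        (fun (st : List (Int × Int)) ix => ix :: pvPopLt ix.2 st) []
    let stack := stackRev.reverse
    let b := (stack.zip stackRev).foldl
        (fun acc piv => PySem.List.pySetD acc piv.1.1 piv.2.2) a
    if (PySem.List.pyRange 0 ((b.length : Int) - 1) 1).all
        (fun j => decide (PySem.List.pyGetD b j 0 ≤ PySem.List.pyGetD b (j + 1) 0)) then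
      let top := (PySem.List.pyGetD stack 0 ((0 : Int), (0 : Int))).2
      let ties := stack.foldl (fun (acc : Int) p => if p.2 = top then acc + 1 else acc) 0
      (stack.length : Int) - ties
    else -1) := by
  have npos : 0 < a.length := List.length_pos_iff.mpr hne
  have hAfold := pvLoopA_aux a hne ha (a.length - 1) le_rfl
  rw [show a.length - 1 + 1 = a.length from by omega] at hAfold
  obtain ⟨hAB, hlast⟩ := hAfold
  dsimp only
  rw [PySem.List.pyRange_neg_one,
    show (((a.length : Int) - 2) - (-1)).toNat = a.length - 1 from by omega,
    List.foldl_map, hAB]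
  have hstackRev : (PySem.List.enumerate a).foldl
      (fun (st : List (Int × Int)) ix => ix :: pvPopLt ix.2 st) ([] : List (Int × Int))
      = (((List.range a.length).filter (pvKeptPre a a.length)).map
          (fun (i : Nat) => ((i : Int), a.getD i 0))).reverse := by
    have h := pvStackFold a a.length le_rfl
    rwa [List.take_length] at h
  rw [hstackRev, List.reverse_reverse]
  set K : List Nat := (List.range a.length).filter (pvKeptP a.reverse) with hKdef
  set Kf : List Nat := (List.range a.length).filter (pvKeptPre a a.length) with hKfdef
  set subseqL : List Int := K.map (fun k => a.reverse.getD k 0) with hsubdef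
  have hKf : Kf = (K.map (fun k => a.length - 1 - k)).reverse := pvKf_eq a ha
  have hKne : K ≠ [] := List.ne_nil_of_mem (pvK_zero_mem a hne ha)
  have hsubne : subseqL ≠ [] := by simp [hsubdef, hKne]
  have hpair : subseqL.Pairwise (· ≤ ·) := pvSubseq_pairwise a
  have hKfne : Kf ≠ [] := by
    rw [hKf]
    simp [hKne]
  have hKflen : Kf.length = K.length := by
    rw [hKf]
    simp
  have hsublen : subseqL.length = K.length := by simp [hsubdef]
  -- B's stack maps
  have hfst : (Kf.map (fun (i : Nat) => ((i : Int), a.getD i 0))).map Prod.fst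
      = K.reverse.map (fun (k : Nat) => ((a.length - 1 - k : Nat) : Int)) := by
    simp only [hKf, ← List.map_reverse, List.map_map]
    rfl
  have hmem_lt : ∀ k ∈ K.reverse, k < a.length := by
    intro k hk
    have := (List.mem_filter.mp (List.mem_reverse.mp hk)).1
    simpa using this
  have hmapval : Kf.map (fun i => a.getD i 0) = subseqL.reverse := by
    rw [hKf, hsubdef]
    simp only [← List.map_reverse, List.map_map]
    apply List.map_congr_left
    intro k hk
    have hklt : k < a.length := hmem_lt k hk
    simp only [Function.comp]
    rw [List.getD_eq_getElem _ _ (by omega), List.getD_eq_getElem _ _ (by simp; omega),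
      List.getElem_reverse]
  have hsnd : ((Kf.map (fun (i : Nat) => ((i : Int), a.getD i 0))).reverse).map Prod.snd
      = subseqL := by
    rw [List.map_reverse, List.map_map,
      show (Prod.snd ∘ fun (i : Nat) => ((i : Int), a.getD i 0)) = (fun i : Nat => a.getD i 0)
        from rfl,
      hmapval, List.reverse_reverse]
  have hzip : ∀ (s r : List (Int × Int)) (arr : List Int),
      (s.zip r).foldl (fun acc piv => PySem.List.pySetD acc piv.1.1 piv.2.2) arr
      = ((s.map Prod.fst).zip (r.map Prod.snd)).foldl
          (fun acc iv => PySem.List.pySetD acc iv.1 iv.2) arr := by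
    intro s r arr
    rw [List.zip_map, List.foldl_map]
    rfl
  rw [hzip, hfst, hsnd]
  -- A's index list, pop loop and write-back
  have hKlt : ∀ k ∈ K, k < a.length := by
    intro k hk
    simpa using (List.mem_filter.mp hk).1
  have hindeq : K.map (fun (k : Nat) => (a.length : Int) - 1 - (k : Int))
      = (K.map (fun k => a.length - 1 - k)).map (fun (k : Nat) => (k : Int)) := by
    rw [List.map_map]
    apply List.map_congr_left
    intro k hk
    have := hKlt k hk
    simp only [Function.comp]
    omega
  have hposeq : K.reverse.map (fun (k : Nat) => ((a.length - 1 - k : Nat) : Int))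
      = ((K.map (fun k => a.length - 1 - k)).reverse).map (fun (k : Nat) => (k : Int)) := by
    rw [List.map_reverse, List.map_reverse, List.map_map]
    rfl
  rw [hindeq, pvPopFold _ _ _ (by simp [hsublen])]
  have hnodup : (K.map (fun k => a.length - 1 - k)).Nodup := by
    refine List.Nodup.map_on ?_ (List.Nodup.filter _ (List.nodup_range))
    intro x hx y hy hxy
    have hx' := hKlt x hx
    have hy' := hKlt y hy
    omega
  have ha2 : (((K.map (fun k => a.length - 1 - k)).map (fun (k : Nat) => (k : Int))).zip subseqL.reverse).foldl
        (fun acc iv => PySem.List.pySetD acc iv.1 iv.2) a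
      = ((((K.map (fun k => a.length - 1 - k)).reverse).map (fun (k : Nat) => (k : Int))).zip subseqL).foldl
        (fun acc iv => PySem.List.pySetD acc iv.1 iv.2) a := by
    have hz : (K.map (fun k => a.length - 1 - k)).zip subseqL.reverse
        = ((K.map (fun k => a.length - 1 - k)).reverse.zip subseqL).reverse := by
      rw [← pvZipReverse ((K.map (fun k => a.length - 1 - k)).reverse) subseqL (by simp [hsublen]),
        List.reverse_reverse]
    conv_lhs => rw [List.zip_map_left, hz]
    conv_rhs => rw [List.zip_map_left]
    rw [List.foldl_map, List.foldl_map]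
    simp only [Prod.map_fst, Prod.map_snd, id_eq, PySem.List.pySetD_natCast]
    exact pvSetFold_reverse _ (by
      rw [List.map_fst_zip (le_of_eq (by simp [hsublen]))]
      exact List.nodup_reverse.mpr hnodup) a
  rw [ha2, ← hposeq]
  -- the written array
  set w : List Int := ((K.reverse.map (fun (k : Nat) => ((a.length - 1 - k : Nat) : Int))).zip subseqL).foldl
      (fun acc iv => PySem.List.pySetD acc iv.1 iv.2) a with hwdef
  have hwlen : w.length = a.length := by rw [hwdef]; exact pvPySetFold_length _ _
  -- the two sortedness tests agree
  have hcond : (w = PySem.List.sorted w (fun x => x)) ↔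
      ((PySem.List.pyRange 0 ((w.length : Int) - 1) 1).all
        (fun j => decide (PySem.List.pyGetD w j 0 ≤ PySem.List.pyGetD w (j + 1) 0)) = true) := by
    rw [show ((w.length : Int) - 1) = ((w.length - 1 : Nat) : Int) from by
        rw [hwlen]; omega,
      PySem.List.pyRange_zero_nat, List.all_map, List.all_eq_true]
    constructor
    · intro h j hj
      have hp : w.Pairwise (· ≤ ·) := by
        rw [h]
        exact PySem.List.sorted_pairwise _ _
      have hjlt : j + 1 < w.length := by
        have := List.mem_range.mp hj
        omega
      have := (pvPairwise_iff_adj w).mp hp j hjlt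
      simp only [Function.comp, decide_eq_true_eq]
      rw [PySem.List.pyGetD_natCast, show ((j : Nat) : Int) + 1 = ((j + 1 : Nat) : Int) from by push_cast; ring,
        PySem.List.pyGetD_natCast]
      exact this
    · intro h
      refine ((PySem.List.sorted_eq_self_of_pairwise w (fun x => x) ?_).symm)
      rw [pvPairwise_iff_adj w]
      intro j hj
      have hjr : j ∈ List.range (w.length - 1) := by
        rw [List.mem_range]
        omega
      have := h j hjr
      simp only [Function.comp, decide_eq_true_eq] at this
      rw [PySem.List.pyGetD_natCast, show ((j : Nat) : Int) + 1 = ((j + 1 : Nat) : Int) from by push_cast; ring,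
        PySem.List.pyGetD_natCast] at this
      exact this
  -- B's bottom-of-stack value is the last suffix-maximum value
  obtain ⟨k0, ktl, hKf0⟩ : ∃ k0 ktl, Kf = k0 :: ktl := by
    rcases hc : Kf with _ | ⟨k0, ktl⟩
    · exact absurd hc hKfne
    · exact ⟨k0, ktl, rfl⟩
  have htop : (PySem.List.pyGetD (Kf.map (fun (i : Nat) => ((i : Int), a.getD i 0))) 0
        ((0 : Int), (0 : Int))).2
      = PySem.List.pyGetD subseqL (-1) 0 := by
    have hs2 : subseqL = (Kf.map (fun i => a.getD i 0)).reverse := by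
      rw [hmapval, List.reverse_reverse]
    conv_rhs => rw [hs2, hKf0, List.map_cons, List.reverse_cons,
      PySem.List.pyGetD_neg_one_append_singleton]
    rw [hKf0, List.map_cons, PySem.List.pyGetD_zero]
    rfl
  rw [htop]
  set c : Int := PySem.List.pyGetD subseqL (-1) 0 with hcdef
  -- A's maximum is that same value
  have hM : (PySem.List.max? subseqL (fun x => x)).getD 0 = c := by
    rcases hmx : PySem.List.max? subseqL (fun x => x) with _ | mx
    · rcases hsl : subseqL with _ | ⟨x, t⟩
      · exact absurd hsl hsubne
      · rw [hsl, PySem.List.max?_id_cons] at hmx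
        exact absurd hmx (by simp)
    · rw [hcdef, PySem.List.pyGetD_neg_one _ _ hsubne, Option.getD_some]
      exact le_antisymm
        (pvPairwise_le_getLast subseqL hpair mx (PySem.List.max?_mem hmx) hsubne)
        (PySem.List.max?_isMax hmx _ (List.getLast_mem hsubne))
  -- A's tie-counting loop
  have hacc : (PySem.List.pyRange 0 (subseqL.length : Int) 1).foldl
        (fun acc i => if PySem.List.pyGetD subseqL i 0 = (PySem.List.max? subseqL (fun x => x)).getD 0
          then acc + 1 else acc) (-1 : Int)
      = -1 + (List.countP (fun y => decide (y = c)) subseqL : Int) := by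
    rw [PySem.List.foldl_pyRange_zero_pyGetD' subseqL 0
      (fun acc x => if x = (PySem.List.max? subseqL (fun x => x)).getD 0 then acc + 1 else acc) (-1),
      show (fun (acc : Int) (x : Int) =>
          if x = (PySem.List.max? subseqL (fun x => x)).getD 0 then acc + 1 else acc)
        = (fun (acc : Int) (x : Int) => if x = c then acc + 1 else acc) from by rw [hM]]
    exact PySem.List.foldl_ite_add_one (fun x : Int => x = c) subseqL (-1)
  rw [hacc]
  -- B's tie-counting loop
  rw [PySem.List.foldl_ite_add_one (fun p : Int × Int => p.2 = c)
    (Kf.map (fun (i : Nat) => ((i : Int), a.getD i 0))) 0]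
  have hcount : List.countP (fun x : Int × Int => decide (x.2 = c))
        (Kf.map (fun (i : Nat) => ((i : Int), a.getD i 0)))
      = List.countP (fun y : Int => decide (y = c)) subseqL := by
    rw [List.countP_map,
      show ((fun x : Int × Int => decide (x.2 = c)) ∘ (fun (i : Nat) => ((i : Int), a.getD i 0)))
        = ((fun y : Int => decide (y = c)) ∘ (fun i : Nat => a.getD i 0)) from rfl,
      ← List.countP_map, hmapval, List.countP_reverse]
  rw [hcount]
  -- conclude by cases on the sortedness test
  by_cases hc : w = PySem.List.sorted w (fun x => x)
  · rw [if_pos hc, if_pos (hcond.mp hc)]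
    simp only [List.length_map, hKflen]
    omega
  · rw [if_neg hc, if_neg (fun hcc => hc (hcond.mpr hcc))]

theorem solve_main (test : String) (h : test.toList ≠ []) : solve test = solve_alt test := by
  have hne : test.toList.map (fun c => (c.toNat : Int)) ≠ [] := by
    simpa using h
  have ha : ∀ x ∈ test.toList.map (fun c => (c.toNat : Int)), 0 ≤ x := by
    intro x hx
    obtain ⟨c, _, rfl⟩ := List.mem_map.mp hx
    exact Int.natCast_nonneg _
  exact pvMain (test.toList.map (fun c => (c.toNat : Int))) hne ha

-- ===== VERDICT (by name: the statement is the Claim_ definition above) =====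
theorem solve_spec : Claim_equal_solve := by
  intro test _ hpre
  unfold Spec_solve
  exact solve_main test (fun hl => hpre (String.toList_eq_nil_iff.mp hl))
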